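-- pv_equiv track=rewrite | github.com/MichaelT-178/ApartmentRegistry | Python/createClass.py | create_getters_and_setters
-- ===== SOURCE A (Python) =====
-- def create_getters_and_setters(a_list, lines, object_name):
--
--     method_string = ""
--
--     s1 = " " if (lines == 1) else "\n"
--     s2 = "" if (lines == 1) else "\t"
--
--     for var in a_list:
--         split_var = var.split()
--
--         name = split_var[1]
--         data_type = split_var[2]
--
--         #Character if on first iteration or not
--
--         method_string += (
--         f"\t/**\n"
--         f"\t * Getter method for the {name} attribute\n"
--         f"\t * @return The {name} attribute of the {object_name}\n"
--         "\t */\n"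
--         f"\tpublic {data_type} get{name[0].upper() + name[1:]}() {{{s1}"
--             f"{s2}{s2}return this.{name};{s1}"
--         f"{s2}}}\n\n")
--
--     for var in a_list:
--
--         split_var = var.split()
--
--         name = split_var[1]
--         data_type = split_var[2]
--
--         method_string += (
--         f"\t/**\n"
--         f"\t * Set the {name} attribute of the {object_name}\n"
--         f"\t * @param {name} The {name} parameter to be set\n"
--         "\t */\n"
--         f"\tpublic void set{name[0].upper() + name[1:]}({data_type} {name}) {{{s1}"
--             f"{s2}{s2}this.{name} = {name};{s1}"
--         f"{s2}}}\n\n")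
--
--     return f"{method_string}"
-- ===== SOURCE B (Python) =====
-- def create_getters_and_setters(a_list, lines, object_name):
--     s1, s2 = (" ", "") if lines == 1 else ("\n", "\t")
--
--     def doc(doc_lines):
--         return "".join("\t * " + line + "\n" for line in doc_lines)
--
--     def method(doc_lines, sig, body):
--         return ("\t/**\n" + doc(doc_lines) + "\t */\n"
--                 + "\t" + sig + " {" + s1
--                 + s2 + s2 + body + s1
--                 + s2 + "}\n\n")
--
--     def getter(name, data_type):
--         cap = name[0].upper() + name[1:]
--         return method(
--             ["Getter method for the " + name + " attribute",
--              "@return The " + name + " attribute of the " + object_name],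
--             "public " + data_type + " get" + cap + "()",
--             "return this." + name + ";")
--
--     def setter(name, data_type):
--         cap = name[0].upper() + name[1:]
--         return method(
--             ["Set the " + name + " attribute of the " + object_name,
--              "@param " + name + " The " + name + " parameter to be set"],
--             "public void set" + cap + "(" + data_type + " " + name + ")",
--             "this." + name + " = " + name + ";")
--
--     def rec(xs, make):
--         if not xs:
--             return ""
--         parts = xs[0].split()
--         return make(parts[1], parts[2]) + rec(xs[1:], make)
--
--     return rec(a_list, getter) + rec(a_list, setter)
-- ===== Notes on version B (the rewrite author's own statement) =====
-- stated objective: alternative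
-- what changed: Replaced A's two flat f-string accumulation loops with a recursive traversal parameterised by a method-maker, where each method is assembled compositionally from a javadoc-block builder (join over doc lines) and a generic signature/body/brace renderer.
import Mathlib
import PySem

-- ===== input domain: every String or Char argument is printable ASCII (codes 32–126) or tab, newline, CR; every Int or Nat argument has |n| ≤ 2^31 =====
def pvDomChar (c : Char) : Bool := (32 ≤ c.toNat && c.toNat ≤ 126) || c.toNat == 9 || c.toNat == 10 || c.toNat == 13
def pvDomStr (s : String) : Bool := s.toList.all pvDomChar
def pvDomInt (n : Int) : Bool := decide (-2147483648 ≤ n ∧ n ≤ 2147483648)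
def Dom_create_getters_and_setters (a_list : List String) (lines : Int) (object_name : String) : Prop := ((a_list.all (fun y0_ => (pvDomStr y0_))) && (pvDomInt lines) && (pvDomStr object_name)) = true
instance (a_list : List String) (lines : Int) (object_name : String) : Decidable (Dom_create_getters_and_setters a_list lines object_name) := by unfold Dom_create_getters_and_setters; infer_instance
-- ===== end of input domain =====

-- B rebuilds each method compositionally (javadoc-block builder + generic signature/body renderer) and
-- traverses a_list by structural recursion parameterised by the method-maker; A runs two flat += loops.
-- Same return value wherever A returns (Pre_ excludes vars with < 3 whitespace tokens, where A raises IndexError).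


-- ===== PORT A =====
-- the getter text A appends for one var (split_var[1]/[2]: pyGet? none = IndexError, excluded by Pre_;
-- split() tokens are nonempty, so name[0] cannot raise inside Pre_ and getD is unreachable there)
def pvA_getter (object_name s1 s2 var : String) : String :=
  let split_var := PySem.Str.split₀ var
  let name := (PySem.List.pyGet? split_var 1).getD ""
  let data_type := (PySem.List.pyGet? split_var 2).getD ""
  "\t/**\n" ++
  "\t * Getter method for the " ++ name ++ " attribute\n" ++
  "\t * @return The " ++ name ++ " attribute of the " ++ object_name ++ "\n" ++
  "\t */\n" ++
  "\tpublic " ++ data_type ++ " get" ++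
    (String.singleton (PySem.Chars.upperChar ((PySem.Str.pyGet? name 0).getD ' ')) ++
      PySem.Str.slice name (some 1) none) ++ "() {" ++ s1 ++
  s2 ++ s2 ++ "return this." ++ name ++ ";" ++ s1 ++
  s2 ++ "}\n\n"

-- the setter text A appends for one var
def pvA_setter (object_name s1 s2 var : String) : String :=
  let split_var := PySem.Str.split₀ var
  let name := (PySem.List.pyGet? split_var 1).getD ""
  let data_type := (PySem.List.pyGet? split_var 2).getD ""
  "\t/**\n" ++
  "\t * Set the " ++ name ++ " attribute of the " ++ object_name ++ "\n" ++
  "\t * @param " ++ name ++ " The " ++ name ++ " parameter to be set\n" ++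
  "\t */\n" ++
  "\tpublic void set" ++
    (String.singleton (PySem.Chars.upperChar ((PySem.Str.pyGet? name 0).getD ' ')) ++
      PySem.Str.slice name (some 1) none) ++ "(" ++ data_type ++ " " ++ name ++ ") {" ++ s1 ++
  s2 ++ s2 ++ "this." ++ name ++ " = " ++ name ++ ";" ++ s1 ++
  s2 ++ "}\n\n"

def create_getters_and_setters (a_list : List String) (lines : Int) (object_name : String) : String :=
  let s1 := if lines == 1 then " " else "\n"
  let s2 := if lines == 1 then "" else "\t"
  let method_string := a_list.foldl (fun ms var => ms ++ pvA_getter object_name s1 s2 var) ""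
  let method_string := a_list.foldl (fun ms var => ms ++ pvA_setter object_name s1 s2 var) method_string
  method_string

-- ===== PORT B =====
-- B's doc(): "".join of "\t * " + line + "\n" over the doc lines
def pvB_doc (doc_lines : List String) : String :=
  PySem.Str.join "" (doc_lines.map (fun line => "\t * " ++ line ++ "\n"))

-- B's method(): javadoc block, then signature + brace block with s1/s2 layout
def pvB_method (s1 s2 : String) (doc_lines : List String) (sig body : String) : String :=
  "\t/**\n" ++ pvB_doc doc_lines ++ "\t */\n" ++
  "\t" ++ sig ++ " {" ++ s1 ++
  s2 ++ s2 ++ body ++ s1 ++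
  s2 ++ "}\n\n"

def pvB_getter (object_name s1 s2 name data_type : String) : String :=
  let cap := String.singleton (PySem.Chars.upperChar ((PySem.Str.pyGet? name 0).getD ' ')) ++
      PySem.Str.slice name (some 1) none
  pvB_method s1 s2
    ["Getter method for the " ++ name ++ " attribute",
     "@return The " ++ name ++ " attribute of the " ++ object_name]
    ("public " ++ data_type ++ " get" ++ cap ++ "()")
    ("return this." ++ name ++ ";")

def pvB_setter (object_name s1 s2 name data_type : String) : String :=
  let cap := String.singleton (PySem.Chars.upperChar ((PySem.Str.pyGet? name 0).getD ' ')) ++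
      PySem.Str.slice name (some 1) none
  pvB_method s1 s2
    ["Set the " ++ name ++ " attribute of the " ++ object_name,
     "@param " ++ name ++ " The " ++ name ++ " parameter to be set"]
    ("public void set" ++ cap ++ "(" ++ data_type ++ " " ++ name ++ ")")
    ("this." ++ name ++ " = " ++ name ++ ";")

-- B's rec(): structural recursion, splitting the head var and applying the method-maker
def pvB_rec (make : String → String → String) : List String → String
  | [] => ""
  | x :: rest =>
      let parts := PySem.Str.split₀ x
      make ((PySem.List.pyGet? parts 1).getD "") ((PySem.List.pyGet? parts 2).getD "") ++
        pvB_rec make rest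

def create_getters_and_setters_alt (a_list : List String) (lines : Int) (object_name : String) : String :=
  let s1 := if lines == 1 then " " else "\n"
  let s2 := if lines == 1 then "" else "\t"
  pvB_rec (pvB_getter object_name s1 s2) a_list ++ pvB_rec (pvB_setter object_name s1 s2) a_list

-- ===== PRECONDITION & SPEC =====
-- Pre_ excludes exactly the vars whose split() has fewer than 3 tokens: there A raises IndexError.
def Pre_create_getters_and_setters (a_list : List String) (lines : Int) (object_name : String) : Prop :=
  ∀ var ∈ a_list, 3 ≤ (PySem.Str.split₀ var).length
instance (a_list : List String) (lines : Int) (object_name : String) : Decidable (Pre_create_getters_and_setters a_list lines object_name) := by unfold Pre_create_getters_and_setters; infer_instance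

def pvWitness_create_getters_and_setters : List String × Int × String :=
  (["private age int", "public name String"], 1, "Person")

def Spec_create_getters_and_setters (a_list : List String) (lines : Int) (object_name : String) (out : String) : Prop := out = create_getters_and_setters_alt a_list lines object_name
instance (a_list : List String) (lines : Int) (object_name : String) (out : String) : Decidable (Spec_create_getters_and_setters a_list lines object_name out) := by unfold Spec_create_getters_and_setters; infer_instance

-- ===== CLAIM (what is proved, stated in full; the proofs are below) =====
def Claim_equal_create_getters_and_setters : Prop := ∀ (a_list : List String) (lines : Int) (object_name : String), Dom_create_getters_and_setters a_list lines object_name → Pre_create_getters_and_setters a_list lines object_name → Spec_create_getters_and_setters a_list lines object_name (create_getters_and_setters a_list lines object_name)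

-- ===== LEMMAS AND PROOFS =====

theorem pv_join_nil_cons (x : String) (xs : List String) :
    PySem.Str.join "" (x :: xs) = x ++ PySem.Str.join "" xs := by
  cases xs with
  | nil => simp [PySem.Str.join, PySem.Chars.join, List.intercalate]
  | cons y ys =>
    simp [PySem.Str.join, PySem.Chars.join, List.intercalate, String.ofList_append]

-- A's append-accumulating fold is `acc ++ "".join(map g l)`
theorem pv_foldA (g : String → String) (l : List String) (acc : String) :
    l.foldl (fun ms var => ms ++ g var) acc = acc ++ PySem.Str.join "" (l.map g) := by
  induction l generalizing acc with
  | nil => simp [PySem.Str.join, PySem.Chars.join, List.intercalate]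
  | cons x xs ih =>
    simp only [List.foldl_cons, List.map_cons, pv_join_nil_cons, ih]
    rw [String.append_assoc]

-- B's recursion over a_list is the join of the per-var method texts
theorem pv_recB (make : String → String → String) (l : List String) :
    pvB_rec make l = PySem.Str.join "" (l.map (fun x =>
      make ((PySem.List.pyGet? (PySem.Str.split₀ x) 1).getD "")
           ((PySem.List.pyGet? (PySem.Str.split₀ x) 2).getD ""))) := by
  induction l with
  | nil => simp [pvB_rec, PySem.Str.join, PySem.Chars.join, List.intercalate]
  | cons x xs ih => simp only [pvB_rec, List.map_cons, pv_join_nil_cons, ih]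

theorem pv_join_nil : PySem.Str.join "" ([] : List String) = "" := by
  simp [PySem.Str.join, PySem.Chars.join, List.intercalate]

-- per-var: B's compositional getter text is exactly A's getter f-string
theorem pv_getter_eq (o s1 s2 var : String) :
    pvB_getter o s1 s2 ((PySem.List.pyGet? (PySem.Str.split₀ var) 1).getD "")
        ((PySem.List.pyGet? (PySem.Str.split₀ var) 2).getD "")
      = pvA_getter o s1 s2 var := by
  refine String.toList_injective ?_
  unfold pvB_getter pvB_method pvB_doc pvA_getter
  simp only [List.map_cons, List.map_nil, pv_join_nil_cons, pv_join_nil]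
  simp

-- per-var: B's compositional setter text is exactly A's setter f-string
theorem pv_setter_eq (o s1 s2 var : String) :
    pvB_setter o s1 s2 ((PySem.List.pyGet? (PySem.Str.split₀ var) 1).getD "")
        ((PySem.List.pyGet? (PySem.Str.split₀ var) 2).getD "")
      = pvA_setter o s1 s2 var := by
  refine String.toList_injective ?_
  unfold pvB_setter pvB_method pvB_doc pvA_setter
  simp only [List.map_cons, List.map_nil, pv_join_nil_cons, pv_join_nil]
  simp

-- ===== VERDICT (by name: the statement is the Claim_ definition above) =====
theorem create_getters_and_setters_spec : Claim_equal_create_getters_and_setters := by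
  intro a_list lines object_name _ _
  unfold Spec_create_getters_and_setters create_getters_and_setters create_getters_and_setters_alt
  simp only [pv_foldA, pv_recB, pv_getter_eq, pv_setter_eq]
  refine String.toList_injective ?_
  simp
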